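-- pv_equiv track=rewrite | github.com/LyM-Projects-Eric-Alarcon-Luis-Pinilla/Project-0 | App/parameter.py | list_parameter_def
-- ===== SOURCE A (Python) =====
-- def list_parameter_def(sublist:list)->list:
--
--     i = 0
--     flag = True
--     parameter_list = []
--
--     while i < len(sublist) and flag:
--         token = sublist[i]
--
--         if token == ")":
--             flag = False
--
--         elif token != "," and token != "(":
--             parameter_list.append(token)
--
--         i += 1
--
--     return parameter_list
-- ===== SOURCE B (Python) =====
-- def list_parameter_def(sublist: list) -> list:
--     if ")" in sublist:
--         prefix = sublist[:sublist.index(")")]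
--     else:
--         prefix = sublist
--     return [token for token in prefix if token not in (",", "(")]
-- ===== Notes on version B (the rewrite author's own statement) =====
-- stated objective: simpler
-- what changed: Replaced the fused early-exit while loop with flag state by a two-pass decomposition: first locate the first ')' and truncate, then filter out ',' and '(' with a comprehension.
import Mathlib
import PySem

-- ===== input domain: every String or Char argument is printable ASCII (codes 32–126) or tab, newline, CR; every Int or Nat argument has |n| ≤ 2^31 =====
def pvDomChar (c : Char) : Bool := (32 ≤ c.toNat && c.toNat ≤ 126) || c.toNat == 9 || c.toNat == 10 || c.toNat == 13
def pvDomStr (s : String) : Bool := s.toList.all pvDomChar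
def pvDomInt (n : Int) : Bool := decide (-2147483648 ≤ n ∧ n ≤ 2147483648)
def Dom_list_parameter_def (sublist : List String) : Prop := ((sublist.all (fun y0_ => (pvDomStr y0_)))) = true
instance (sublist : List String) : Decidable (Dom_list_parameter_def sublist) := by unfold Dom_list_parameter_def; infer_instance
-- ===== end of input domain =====

-- B replaces A's fused early-exit while loop by a locate-')'-then-filter two-pass decomposition (simpler).


-- ===== PORT A =====
-- A's while loop: advance i while flag; ')' clears the flag (early exit), ',' and '(' are
-- skipped, everything else is appended to parameter_list.  Ported as structural recursion
-- on the remaining suffix with the accumulated parameter_list as state.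
def pvLoopA : List String → List String → List String
  | [], acc => acc
  | token :: rest, acc =>
    if token = ")" then acc
    else if token ≠ "," ∧ token ≠ "(" then pvLoopA rest (acc ++ [token])
    else pvLoopA rest acc

def list_parameter_def (sublist : List String) : List String :=
  pvLoopA sublist []

-- ===== PORT B =====
-- B: truncate before the first ')' (if any), then filter the prefix.
-- sublist[:i] with 0 ≤ i = List.take i (exact here: index? returns a valid nonnegative index).
def pvPrefixB (sublist : List String) : List String :=
  match PySem.List.index? sublist ")" with
  | some i => sublist.take i
  | none => sublist

def list_parameter_def_alt (sublist : List String) : List String :=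
  (pvPrefixB sublist).filter (fun token => token ≠ "," ∧ token ≠ "(")

-- ===== PRECONDITION & SPEC =====
def Spec_list_parameter_def (sublist : List String) (out : List String) : Prop := out = list_parameter_def_alt sublist
instance (sublist : List String) (out : List String) : Decidable (Spec_list_parameter_def sublist out) := by unfold Spec_list_parameter_def; infer_instance

-- ===== CLAIM (what is proved, stated in full; the proofs are below) =====
def Claim_equal_list_parameter_def : Prop := ∀ (sublist : List String), Dom_list_parameter_def sublist → Spec_list_parameter_def sublist (list_parameter_def sublist)

-- ===== LEMMAS AND PROOFS =====
theorem pvPrefixB_cons_ne {t : String} (ts : List String) (h : t ≠ ")") :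
    pvPrefixB (t :: ts) = t :: pvPrefixB ts := by
  unfold pvPrefixB
  rw [PySem.List.index?_cons_of_ne ts h]
  cases PySem.List.index? ts ")" <;> simp

theorem pvPrefixB_cons_self (ts : List String) :
    pvPrefixB (")" :: ts) = [] := by
  unfold pvPrefixB
  rw [PySem.List.index?_cons_self ")" ts]
  simp

theorem pvLoopA_eq_alt (ts acc : List String) :
    pvLoopA ts acc = acc ++ list_parameter_def_alt ts := by
  induction ts generalizing acc with
  | nil => simp [pvLoopA, list_parameter_def_alt, pvPrefixB, PySem.List.index?]
  | cons t rest ih =>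
    by_cases ht : t = ")"
    · subst ht
      simp [pvLoopA, list_parameter_def_alt, pvPrefixB_cons_self]
    · by_cases hk : t ≠ "," ∧ t ≠ "("
      · simp only [pvLoopA, if_neg ht, if_pos hk, ih]
        simp [list_parameter_def_alt, pvPrefixB_cons_ne _ ht, List.filter_cons, hk.1, hk.2]
      · simp only [pvLoopA, if_neg ht, if_neg hk, ih]
        have hcond : (!decide (t = ",") && !decide (t = "(")) = false := by
          rcases not_and_or.mp hk with h | h <;> simp at h <;> simp [h]
        simp [list_parameter_def_alt, pvPrefixB_cons_ne rest ht, List.filter_cons, hcond]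

-- ===== VERDICT (by name: the statement is the Claim_ definition above) =====
theorem list_parameter_def_spec : Claim_equal_list_parameter_def := by
  intro sublist _
  unfold Spec_list_parameter_def list_parameter_def
  simpa using pvLoopA_eq_alt sublist []
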